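-- pv_equiv track=rewrite | github.com/agiachris/STAP | scripts/data/generate_policy_dataset.py | count_num_box_objs_in_state
-- ===== SOURCE A (Python) =====
-- from typing import Any, Dict, List, Literal, Optional, Set, Tuple, Union
--
-- def count_num_box_objs_in_state(
--     symbolic_predicate_state: Union[List[str], Set[Tuple[str, str]]],
--     objects_with_properties: List[Tuple[str, str]],
-- ) -> int:
--     """Count the number of unique objets of box type involved in the symbolic predicate state.
--
--     Args:
--         symbolic_predicate_states (List[str]): List of symbolic predicate states.
--         E.g. [on(red_box, table), on(blue_box, rack), ...]
--         objects_with_properties (List[Tuple[str, str]]): List of objects with properties.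
--
--     Returns:
--         int: Number of box type objects involved in the symbolic predicate state.
--     """
--     available_box_obj_set = set()
--     for obj, prop in objects_with_properties:
--         if prop == "box":
--             available_box_obj_set.add(obj)
--
--     seen_box_obj_set = set()
--     for single_symbolic_predicate_state in symbolic_predicate_state:
--         for box in available_box_obj_set:
--             if box in single_symbolic_predicate_state:
--                 seen_box_obj_set.add(box)
--
--     return len(seen_box_obj_set)
-- ===== SOURCE B (Python) =====
-- def count_num_box_objs_in_state(symbolic_predicate_state, objects_with_properties):
--     boxes = {obj for obj, prop in objects_with_properties if prop == "box"}
--     lengths = {len(box) for box in boxes}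
--     seen = set()
--     for state in symbolic_predicate_state:
--         n = len(state)
--         for length in lengths:
--             for i in range(n - length + 1):
--                 window = state[i:i + length]
--                 if window in boxes:
--                     seen.add(window)
--     return len(seen)
-- ===== Notes on version B (the rewrite author's own statement) =====
-- stated objective: alternative
-- what changed: A is pattern-driven: for each predicate string it scans every box name with a substring test; B is text-driven: it indexes the box names as a hash set keyed by their distinct lengths and slides windows of those lengths over each predicate string, counting the windows that hit the set.
import Mathlib
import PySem

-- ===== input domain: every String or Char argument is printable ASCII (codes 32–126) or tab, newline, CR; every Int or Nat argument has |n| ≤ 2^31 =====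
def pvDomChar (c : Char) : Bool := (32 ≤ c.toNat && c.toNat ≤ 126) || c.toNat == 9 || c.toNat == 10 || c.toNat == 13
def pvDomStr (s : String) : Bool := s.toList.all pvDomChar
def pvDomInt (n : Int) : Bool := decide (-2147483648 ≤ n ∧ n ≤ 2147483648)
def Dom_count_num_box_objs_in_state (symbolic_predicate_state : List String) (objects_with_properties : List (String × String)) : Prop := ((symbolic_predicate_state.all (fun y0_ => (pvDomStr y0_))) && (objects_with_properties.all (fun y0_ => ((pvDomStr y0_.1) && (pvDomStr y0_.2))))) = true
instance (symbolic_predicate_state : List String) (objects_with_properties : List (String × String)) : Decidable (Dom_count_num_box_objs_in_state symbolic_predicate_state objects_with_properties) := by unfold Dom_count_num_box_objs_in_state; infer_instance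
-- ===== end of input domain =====

-- B replaces A's pattern-driven substring scan (every box name tested against every
-- predicate string) by a text-driven window scan: the box names go into a set keyed by
-- their distinct lengths, and windows of those lengths slid over each predicate string
-- are looked up in that set (objective: alternative).

-- ===== PORT A =====
def count_num_box_objs_in_state (symbolic_predicate_state : List String) (objects_with_properties : List (String × String)) : Int :=
  let available_box_obj_set : PySem.Set String :=
    objects_with_properties.foldl (fun s p =>
      if p.2 == "box" then PySem.Set.add s p.1 else s) PySem.Set.empty
  let seen_box_obj_set : PySem.Set String :=
    symbolic_predicate_state.foldl (fun seen single =>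
      available_box_obj_set.foldl (fun seen box =>
        if PySem.Str.isIn box single then PySem.Set.add seen box else seen) seen)
      PySem.Set.empty
  PySem.Set.len seen_box_obj_set

-- ===== PORT B =====
def count_num_box_objs_in_state_alt (symbolic_predicate_state : List String) (objects_with_properties : List (String × String)) : Int :=
  let boxes : PySem.Set String :=
    PySem.Set.ofList ((objects_with_properties.filter (fun p => p.2 == "box")).map Prod.fst)
  let lengths : PySem.Set Int := PySem.Set.ofList (boxes.map PySem.Str.len)
  let seen : PySem.Set String :=
    symbolic_predicate_state.foldl (fun seen state =>
      let n := PySem.Str.len state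
      lengths.foldl (fun seen length =>
        (PySem.List.pyRange 0 (n - length + 1)).foldl (fun seen i =>
          let window := PySem.Str.slice state (some i) (some (i + length))
          if PySem.Set.contains boxes window then PySem.Set.add seen window else seen)
          seen) seen) PySem.Set.empty
  PySem.Set.len seen

-- ===== PRECONDITION & SPEC =====
def Spec_count_num_box_objs_in_state (symbolic_predicate_state : List String) (objects_with_properties : List (String × String)) (out : Int) : Prop := out = count_num_box_objs_in_state_alt symbolic_predicate_state objects_with_properties
instance (symbolic_predicate_state : List String) (objects_with_properties : List (String × String)) (out : Int) : Decidable (Spec_count_num_box_objs_in_state symbolic_predicate_state objects_with_properties out) := by unfold Spec_count_num_box_objs_in_state; infer_instance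

-- ===== CLAIM (what is proved, stated in full; the proofs are below) =====
def Claim_equal_count_num_box_objs_in_state : Prop := ∀ (symbolic_predicate_state : List String) (objects_with_properties : List (String × String)), Dom_count_num_box_objs_in_state symbolic_predicate_state objects_with_properties → Spec_count_num_box_objs_in_state symbolic_predicate_state objects_with_properties (count_num_box_objs_in_state symbolic_predicate_state objects_with_properties)

-- ===== LEMMAS AND PROOFS =====

-- any fold whose step preserves Nodup preserves Nodup
lemma pv_foldl_nodup {α β : Type} (l : List α) (f : PySem.Set β → α → PySem.Set β)
    (hf : ∀ s a, List.Nodup s → List.Nodup (f s a)) (seen : PySem.Set β)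
    (h : List.Nodup seen) : List.Nodup (l.foldl f seen) := by
  induction l generalizing seen with
  | nil => exact h
  | cons x t ih => exact ih _ (hf _ _ h)

-- A's available-box fold = set of the filtered-mapped list
lemma pv_avail_eq (objs : List (String × String)) (s : PySem.Set String) :
    objs.foldl (fun s p => if p.2 == "box" then PySem.Set.add s p.1 else s) s
      = (objs.filter (fun p => p.2 == "box")).foldl (fun s p => PySem.Set.add s p.1) s := by
  induction objs generalizing s with
  | nil => rfl
  | cons h t ih =>
    rw [List.foldl_cons, List.filter_cons]
    by_cases hb : (h.2 == "box") = true
    · rw [if_pos hb, if_pos hb, List.foldl_cons]; exact ih _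
    · rw [if_neg hb, if_neg hb]; exact ih _

-- membership after A's inner fold over the available boxes
lemma pvA_inner_mem (avail : List String) (single : String) (seen : PySem.Set String) (x : String) :
    (x ∈ avail.foldl (fun seen box =>
        if PySem.Str.isIn box single then PySem.Set.add seen box else seen) seen)
    ↔ (x ∈ seen ∨ (x ∈ avail ∧ PySem.Str.isIn x single = true)) := by
  induction avail generalizing seen with
  | nil => simp
  | cons h t ih =>
    rw [List.foldl_cons]
    by_cases hi : PySem.Str.isIn h single = true
    · rw [if_pos hi, ih]
      simp only [PySem.Set.mem_add, List.mem_cons]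
      constructor
      · rintro ((hx | rfl) | ⟨hx, hs⟩)
        · tauto
        · exact Or.inr ⟨Or.inl rfl, hi⟩
        · tauto
      · rintro (hx | ⟨(rfl | hx), hs⟩) <;> tauto
    · rw [if_neg hi, ih]
      simp only [List.mem_cons]
      constructor
      · rintro (hx | ⟨hx, hs⟩) <;> tauto
      · rintro (hx | ⟨(rfl | hx), hs⟩)
        · tauto
        · exact absurd hs hi
        · tauto

-- membership after A's outer fold over the predicate strings
lemma pvA_outer_mem (state : List String) (avail : List String) (seen : PySem.Set String) (x : String) :
    (x ∈ state.foldl (fun seen single =>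
        avail.foldl (fun seen box =>
          if PySem.Str.isIn box single then PySem.Set.add seen box else seen) seen) seen)
    ↔ (x ∈ seen ∨ (x ∈ avail ∧ ∃ s ∈ state, PySem.Str.isIn x s = true)) := by
  induction state generalizing seen with
  | nil => simp
  | cons h t ih =>
    rw [List.foldl_cons, ih, pvA_inner_mem]
    simp only [List.exists_mem_cons_iff]
    tauto

-- regrouping of the accumulator disjunction used by the cons cases below
lemma pv_or_assoc (A B Qh Qt : Prop) : ((A ∨ B ∧ Qh) ∨ B ∧ Qt) ↔ A ∨ B ∧ (Qh ∨ Qt) := by tauto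

-- membership after B's window fold over one range of start indices
lemma pvB_range_mem (l : List Int) (st : String) (length : Int)
    (boxes : PySem.Set String) (seen : PySem.Set String) (x : String) :
    (x ∈ l.foldl (fun seen i =>
        if PySem.Set.contains boxes (PySem.Str.slice st (some i) (some (i + length)))
        then PySem.Set.add seen (PySem.Str.slice st (some i) (some (i + length))) else seen) seen)
    ↔ (x ∈ seen ∨ (x ∈ boxes ∧ ∃ i ∈ l, PySem.Str.slice st (some i) (some (i + length)) = x)) := by
  induction l generalizing seen with
  | nil => simp
  | cons h t ih =>
    rw [List.foldl_cons]
    by_cases hc : PySem.Set.contains boxes (PySem.Str.slice st (some h) (some (h + length))) = true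
    · rw [if_pos hc, ih]
      simp only [PySem.Set.mem_add, List.mem_cons]
      constructor
      · rintro ((hx | rfl) | ⟨hb, i, hi, hs⟩)
        · tauto
        · exact Or.inr ⟨(PySem.Set.contains_iff _ _).1 hc, h, Or.inl rfl, rfl⟩
        · exact Or.inr ⟨hb, i, Or.inr hi, hs⟩
      · rintro (hx | ⟨hb, i, (rfl | hi), hs⟩)
        · tauto
        · exact Or.inl (Or.inr hs.symm)
        · exact Or.inr ⟨hb, i, hi, hs⟩
    · rw [if_neg hc, ih]
      simp only [List.mem_cons]
      constructor
      · rintro (hx | ⟨hb, i, hi, hs⟩)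
        · tauto
        · exact Or.inr ⟨hb, i, Or.inr hi, hs⟩
      · rintro (hx | ⟨hb, i, (rfl | hi), hs⟩)
        · tauto
        · exact absurd (hs ▸ (PySem.Set.contains_iff boxes x).2 hb) hc
        · exact Or.inr ⟨hb, i, hi, hs⟩

-- membership after B's fold over the distinct window lengths
lemma pvB_len_mem (ls : List Int) (st : String) (boxes : PySem.Set String)
    (seen : PySem.Set String) (x : String) :
    (x ∈ ls.foldl (fun seen length =>
        (PySem.List.pyRange 0 (PySem.Str.len st - length + 1)).foldl (fun seen i =>
          if PySem.Set.contains boxes (PySem.Str.slice st (some i) (some (i + length)))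
          then PySem.Set.add seen (PySem.Str.slice st (some i) (some (i + length))) else seen)
          seen) seen)
    ↔ (x ∈ seen ∨ (x ∈ boxes ∧ ∃ length ∈ ls, ∃ i ∈ PySem.List.pyRange 0 (PySem.Str.len st - length + 1),
        PySem.Str.slice st (some i) (some (i + length)) = x)) := by
  induction ls generalizing seen with
  | nil => simp
  | cons h t ih =>
    rw [List.foldl_cons, ih, pvB_range_mem]
    simp only [List.exists_mem_cons_iff]
    exact pv_or_assoc _ _ _ _

-- membership after B's fold over the predicate strings
lemma pvB_outer_mem (state : List String) (ls : List Int) (boxes : PySem.Set String)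
    (seen : PySem.Set String) (x : String) :
    (x ∈ state.foldl (fun seen st =>
        ls.foldl (fun seen length =>
          (PySem.List.pyRange 0 (PySem.Str.len st - length + 1)).foldl (fun seen i =>
            if PySem.Set.contains boxes (PySem.Str.slice st (some i) (some (i + length)))
            then PySem.Set.add seen (PySem.Str.slice st (some i) (some (i + length))) else seen)
            seen) seen) seen)
    ↔ (x ∈ seen ∨ (x ∈ boxes ∧ ∃ st ∈ state, ∃ length ∈ ls,
        ∃ i ∈ PySem.List.pyRange 0 (PySem.Str.len st - length + 1),
          PySem.Str.slice st (some i) (some (i + length)) = x)) := by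
  induction state generalizing seen with
  | nil => simp
  | cons h t ih =>
    rw [List.foldl_cons, ih, pvB_len_mem]
    simp only [List.exists_mem_cons_iff]
    exact pv_or_assoc _ _ _ _

-- crux: a box name occurs as a window of its own length iff it is a substring
lemma pv_window_iff (boxes : List String) (x : String) (hx : x ∈ boxes) (st : String) :
    (∃ length ∈ boxes.map PySem.Str.len,
        ∃ i ∈ PySem.List.pyRange 0 (PySem.Str.len st - length + 1),
          PySem.Str.slice st (some i) (some (i + length)) = x)
    ↔ PySem.Str.isIn x st = true := by
  constructor
  · rintro ⟨length, hl, i, hi, hs⟩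
    obtain ⟨b, _, rfl⟩ := List.mem_map.1 hl
    rw [PySem.List.mem_pyRange_one] at hi
    rw [PySem.Str.isIn_iff_infix]
    have hi0 : 0 ≤ i := hi.1
    have hL0 : (0:Int) ≤ PySem.Str.len b := by rw [PySem.Str.len_eq]; positivity
    have hxl : x.toList
        = List.take ((i + PySem.Str.len b).toNat - i.toNat) (List.drop i.toNat st.toList) := by
      rw [← hs, PySem.Str.toList_slice, PySem.Chars.slice_eq_listSlice,
        PySem.List.slice_toNat st.toList hi0 (by omega)]
    refine List.IsInfix.trans ?_ (List.IsSuffix.isInfix (List.drop_suffix i.toNat st.toList))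
    rw [hxl]
    exact (List.take_prefix _ _).isInfix
  · intro hin
    rw [PySem.Str.isIn_iff_infix] at hin
    obtain ⟨pre, suf, hsplit⟩ := hin
    refine ⟨PySem.Str.len x, List.mem_map.2 ⟨x, hx, rfl⟩, (pre.length : Int), ?_, ?_⟩
    · rw [PySem.List.mem_pyRange_one]
      have hlen : st.toList.length = pre.length + x.toList.length + suf.length := by
        rw [← hsplit, List.length_append, List.length_append]
      rw [PySem.Str.len_eq, PySem.Str.len_eq, hlen]
      constructor
      · positivity
      · push_cast; omega
    · rw [← String.toList_inj, PySem.Str.toList_slice, PySem.Chars.slice_eq_listSlice,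
        PySem.List.slice_toNat st.toList (by positivity)
          (by rw [PySem.Str.len_eq]; positivity)]
      have h1 : ((pre.length : Int) + PySem.Str.len x).toNat - (pre.length : Int).toNat
          = x.toList.length := by rw [PySem.Str.len_eq]; omega
      rw [h1, Int.toNat_natCast, ← hsplit, List.append_assoc, List.drop_left,
        List.take_left]

-- ===== VERDICT (by name: the statement is the Claim_ definition above) =====
theorem count_num_box_objs_in_state_spec : Claim_equal_count_num_box_objs_in_state := by
  intro state objs _
  unfold Spec_count_num_box_objs_in_state
  unfold count_num_box_objs_in_state count_num_box_objs_in_state_alt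
  dsimp only
  set boxesL := (objs.filter (fun p => p.2 == "box")).map Prod.fst with hboxesL
  have havail : objs.foldl (fun s p => if p.2 == "box" then PySem.Set.add s p.1 else s)
      PySem.Set.empty = PySem.Set.ofList boxesL := by
    rw [pv_avail_eq, PySem.Set.ofList_eq_foldl, hboxesL, List.foldl_map]
    rfl
  rw [havail]
  set boxes := PySem.Set.ofList boxesL with hboxes
  set seenA := state.foldl (fun seen single =>
      boxes.foldl (fun seen box =>
        if PySem.Str.isIn box single then PySem.Set.add seen box else seen) seen)
      PySem.Set.empty with hseenA
  set seenB := state.foldl (fun seen st =>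
      (PySem.Set.ofList (boxes.map PySem.Str.len)).foldl (fun seen length =>
        (PySem.List.pyRange 0 (PySem.Str.len st - length + 1)).foldl (fun seen i =>
          if PySem.Set.contains boxes (PySem.Str.slice st (some i) (some (i + length)))
          then PySem.Set.add seen (PySem.Str.slice st (some i) (some (i + length))) else seen)
          seen) seen) PySem.Set.empty with hseenB
  have hperm : seenA.Perm seenB := by
    rw [List.perm_ext_iff_of_nodup]
    · intro x
      rw [hseenA, hseenB, pvA_outer_mem, pvB_outer_mem]
      simp only [PySem.Set.empty, List.not_mem_nil, false_or]
      constructor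
      · rintro ⟨hb, s, hsmem, hin⟩
        refine ⟨hb, s, hsmem, ?_⟩
        have := (pv_window_iff boxes x hb s).2 hin
        obtain ⟨L, hL, i, hi, hw⟩ := this
        exact ⟨L, (PySem.Set.mem_ofList _ _).2 hL, i, hi, hw⟩
      · rintro ⟨hb, s, hsmem, L, hL, i, hi, hw⟩
        refine ⟨hb, s, hsmem, (pv_window_iff boxes x hb s).1
          ⟨L, (PySem.Set.mem_ofList _ _).1 hL, i, hi, hw⟩⟩
    · rw [hseenA]
      refine pv_foldl_nodup _ _ (fun s a hs => ?_) _ List.nodup_nil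
      refine pv_foldl_nodup _ _ (fun s' a' hs' => ?_) _ hs
      split_ifs with h
      · exact PySem.Set.nodup_add _ _ hs'
      · exact hs'
    · rw [hseenB]
      refine pv_foldl_nodup _ _ (fun s a hs => ?_) _ List.nodup_nil
      refine pv_foldl_nodup _ _ (fun s' a' hs' => ?_) _ hs
      refine pv_foldl_nodup _ _ (fun s'' a'' hs'' => ?_) _ hs'
      split_ifs with h
      · exact PySem.Set.nodup_add _ _ hs''
      · exact hs''
  simp [PySem.Set.len, hperm.length_eq]
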